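-- pv_equiv track=rewrite | github.com/Ajirohack/CORE | engines/cognitive_synthesis_engine.py | _categorize_patterns
-- ===== SOURCE A (Python) =====
-- from typing import Any, Dict, List
--
-- def _categorize_patterns(patterns: List[str]) -> Dict[str, List[str]]:
--     """Categorize patterns into different types"""
--     categories = {
--         "behavioral": [],
--         "temporal": [],
--         "contextual": [],
--         "environmental": [],
--         "other": []
--     }
--
--     for p in patterns:
--         if "behavior" in p or "action" in p:
--             categories["behavioral"].append(p)
--         elif "time" in p or "schedule" in p or "periodic" in p:
--             categories["temporal"].append(p)
--         elif "context" in p: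
--             categories["contextual"].append(p)
--         elif "environment" in p:
--             categories["environmental"].append(p)
--         else:
--             categories["other"].append(p)
--
--     return categories
-- ===== SOURCE B (Python) =====
-- from typing import Any, Dict, List
--
-- _RULES = [
--     ("behavioral", ["behavior", "action"]),
--     ("temporal", ["time", "schedule", "periodic"]),
--     ("contextual", ["context"]),
--     ("environmental", ["environment"]),
-- ]
--
-- def _category_of(p: str) -> str:
--     for name, keywords in _RULES:
--         if any(k in p for k in keywords):
--             return name
--     return "other"
--
-- def _categorize_patterns(patterns: List[str]) -> Dict[str, List[str]]:
--     """Categorize patterns into different types (per-category filter passes)"""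
--     names = [name for name, _ in _RULES] + ["other"]
--     return {name: [p for p in patterns if _category_of(p) == name] for name in names}
-- ===== Notes on version B (the rewrite author's own statement) =====
-- stated objective: idiomatic
-- what changed: Replaces the per-pattern if/elif dispatch that appends into a mutable dict with a data-driven rule table plus a dict comprehension of per-category filter passes (one filter per category instead of one branch chain per pattern).
import Mathlib
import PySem

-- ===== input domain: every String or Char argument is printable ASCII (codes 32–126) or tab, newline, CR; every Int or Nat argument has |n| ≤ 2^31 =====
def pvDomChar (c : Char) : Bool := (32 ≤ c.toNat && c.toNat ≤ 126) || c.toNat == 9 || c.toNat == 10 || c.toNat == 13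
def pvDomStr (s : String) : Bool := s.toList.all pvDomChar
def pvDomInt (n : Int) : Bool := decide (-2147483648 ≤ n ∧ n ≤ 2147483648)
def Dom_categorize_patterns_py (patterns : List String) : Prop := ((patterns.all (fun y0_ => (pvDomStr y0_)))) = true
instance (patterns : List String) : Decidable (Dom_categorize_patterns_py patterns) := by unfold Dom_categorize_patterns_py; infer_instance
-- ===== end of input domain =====

-- B rewrites A's per-pattern if/elif dispatch into a rule table plus per-category filter passes; objective: idiomatic.

-- ===== PORT A =====
-- the loop body of A: append p to the first matching bucket of the dict
def pvStepA (d : PySem.Dict String (List String)) (p : String) : PySem.Dict String (List String) :=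
  if PySem.Str.isIn "behavior" p || PySem.Str.isIn "action" p then
    d.modify "behavioral" [] (fun l => l ++ [p])
  else if PySem.Str.isIn "time" p || PySem.Str.isIn "schedule" p || PySem.Str.isIn "periodic" p then
    d.modify "temporal" [] (fun l => l ++ [p])
  else if PySem.Str.isIn "context" p then
    d.modify "contextual" [] (fun l => l ++ [p])
  else if PySem.Str.isIn "environment" p then
    d.modify "environmental" [] (fun l => l ++ [p])
  else
    d.modify "other" [] (fun l => l ++ [p])

def categorize_patterns_py (patterns : List String) : List (String × List String) :=
  let categories : PySem.Dict String (List String) :=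
    PySem.Dict.ofList [("behavioral", []), ("temporal", []), ("contextual", []),
                       ("environmental", []), ("other", [])]
  (patterns.foldl pvStepA categories).items

-- ===== PORT B =====
def pvRules : List (String × List String) :=
  [("behavioral", ["behavior", "action"]),
   ("temporal", ["time", "schedule", "periodic"]),
   ("contextual", ["context"]),
   ("environmental", ["environment"])]

-- port of B's _category_of: first rule whose any keyword is a substring of p
def pvCatOfAux : List (String × List String) → String → String
  | [], _ => "other"
  | (name, kws) :: rest, p =>
      if kws.any (fun k => PySem.Str.isIn k p) then name else pvCatOfAux rest p

def pvCategoryOf (p : String) : String := pvCatOfAux pvRules p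

def categorize_patterns_py_alt (patterns : List String) : List (String × List String) :=
  (pvRules.map (fun r => r.1) ++ ["other"]).map
    (fun name => (name, patterns.filter (fun p => pvCategoryOf p == name)))

-- ===== PRECONDITION & SPEC =====
def Spec_categorize_patterns_py (patterns : List String) (out : List (String × List String)) : Prop := out = categorize_patterns_py_alt patterns
instance (patterns : List String) (out : List (String × List String)) : Decidable (Spec_categorize_patterns_py patterns out) := by unfold Spec_categorize_patterns_py; infer_instance

-- ===== CLAIM (what is proved, stated in full; the proofs are below) =====
def Claim_equal_categorize_patterns_py : Prop := ∀ (patterns : List String), Dom_categorize_patterns_py patterns → Spec_categorize_patterns_py patterns (categorize_patterns_py patterns)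

-- ===== LEMMAS AND PROOFS =====
theorem pv_fold_items (patterns : List String) : ∀ (l1 l2 l3 l4 l5 : List String),
    (patterns.foldl pvStepA (PySem.Dict.mk [("behavioral", l1), ("temporal", l2), ("contextual", l3), ("environmental", l4), ("other", l5)])).items =
      [("behavioral", l1 ++ patterns.filter (fun p => pvCategoryOf p == "behavioral")),
       ("temporal",   l2 ++ patterns.filter (fun p => pvCategoryOf p == "temporal")),
       ("contextual", l3 ++ patterns.filter (fun p => pvCategoryOf p == "contextual")),
       ("environmental", l4 ++ patterns.filter (fun p => pvCategoryOf p == "environmental")),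
       ("other", l5 ++ patterns.filter (fun p => pvCategoryOf p == "other"))] := by
  induction patterns with
  | nil => intro l1 l2 l3 l4 l5; simp [PySem.Dict.items]
  | cons p rest ih =>
    intro l1 l2 l3 l4 l5
    rw [List.foldl_cons]
    by_cases h1 : (PySem.Str.isIn "behavior" p || PySem.Str.isIn "action" p) = true
    · 
      have hc : pvCategoryOf p = "behavioral" := by
        simp only [pvCategoryOf, pvRules, pvCatOfAux, List.any_cons, List.any_nil, Bool.or_false, Bool.or_assoc]
        rw [if_pos h1]
      have hstep : pvStepA (PySem.Dict.mk [("behavioral", l1), ("temporal", l2), ("contextual", l3), ("environmental", l4), ("other", l5)]) p = PySem.Dict.mk [("behavioral", l1 ++ [p]), ("temporal", l2), ("contextual", l3), ("environmental", l4), ("other", l5)] := by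
        unfold pvStepA
        rw [if_pos h1]
        simp [PySem.Dict.modify, PySem.Dict.get?, PySem.Dict.getD, PySem.Dict.insert, PySem.Dict.contains]
      rw [hstep, ih]
      simp [List.filter_cons, hc]
    · by_cases h2 : (PySem.Str.isIn "time" p || PySem.Str.isIn "schedule" p || PySem.Str.isIn "periodic" p) = true
      · 
        have h2r := h2
        rw [Bool.or_assoc] at h2r
        have hc : pvCategoryOf p = "temporal" := by
          simp only [pvCategoryOf, pvRules, pvCatOfAux, List.any_cons, List.any_nil, Bool.or_false, Bool.or_assoc]
          rw [if_neg h1]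
          rw [if_pos h2r]
        have hstep : pvStepA (PySem.Dict.mk [("behavioral", l1), ("temporal", l2), ("contextual", l3), ("environmental", l4), ("other", l5)]) p = PySem.Dict.mk [("behavioral", l1), ("temporal", l2 ++ [p]), ("contextual", l3), ("environmental", l4), ("other", l5)] := by
          unfold pvStepA
          rw [if_neg h1]
          rw [if_pos h2]
          simp [PySem.Dict.modify, PySem.Dict.get?, PySem.Dict.getD, PySem.Dict.insert, PySem.Dict.contains]
        rw [hstep, ih]
        simp [List.filter_cons, hc]
      · by_cases h3 : (PySem.Str.isIn "context" p) = true
        · 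
          have h2r := h2
          rw [Bool.or_assoc] at h2r
          have hc : pvCategoryOf p = "contextual" := by
            simp only [pvCategoryOf, pvRules, pvCatOfAux, List.any_cons, List.any_nil, Bool.or_false, Bool.or_assoc]
            rw [if_neg h1]
            rw [if_neg h2r]
            rw [if_pos h3]
          have hstep : pvStepA (PySem.Dict.mk [("behavioral", l1), ("temporal", l2), ("contextual", l3), ("environmental", l4), ("other", l5)]) p = PySem.Dict.mk [("behavioral", l1), ("temporal", l2), ("contextual", l3 ++ [p]), ("environmental", l4), ("other", l5)] := by
            unfold pvStepA
            rw [if_neg h1]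
            rw [if_neg h2]
            rw [if_pos h3]
            simp [PySem.Dict.modify, PySem.Dict.get?, PySem.Dict.getD, PySem.Dict.insert, PySem.Dict.contains]
          rw [hstep, ih]
          simp [List.filter_cons, hc]
        · by_cases h4 : (PySem.Str.isIn "environment" p) = true
          · 
            have h2r := h2
            rw [Bool.or_assoc] at h2r
            have hc : pvCategoryOf p = "environmental" := by
              simp only [pvCategoryOf, pvRules, pvCatOfAux, List.any_cons, List.any_nil, Bool.or_false, Bool.or_assoc]
              rw [if_neg h1]
              rw [if_neg h2r]
              rw [if_neg h3]
              rw [if_pos h4]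
            have hstep : pvStepA (PySem.Dict.mk [("behavioral", l1), ("temporal", l2), ("contextual", l3), ("environmental", l4), ("other", l5)]) p = PySem.Dict.mk [("behavioral", l1), ("temporal", l2), ("contextual", l3), ("environmental", l4 ++ [p]), ("other", l5)] := by
              unfold pvStepA
              rw [if_neg h1]
              rw [if_neg h2]
              rw [if_neg h3]
              rw [if_pos h4]
              simp [PySem.Dict.modify, PySem.Dict.get?, PySem.Dict.getD, PySem.Dict.insert, PySem.Dict.contains]
            rw [hstep, ih]
            simp [List.filter_cons, hc]
          · 
            have h2r := h2
            rw [Bool.or_assoc] at h2r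
            have hc : pvCategoryOf p = "other" := by
              simp only [pvCategoryOf, pvRules, pvCatOfAux, List.any_cons, List.any_nil, Bool.or_false, Bool.or_assoc]
              rw [if_neg h1]
              rw [if_neg h2r]
              rw [if_neg h3]
              rw [if_neg h4]
            have hstep : pvStepA (PySem.Dict.mk [("behavioral", l1), ("temporal", l2), ("contextual", l3), ("environmental", l4), ("other", l5)]) p = PySem.Dict.mk [("behavioral", l1), ("temporal", l2), ("contextual", l3), ("environmental", l4), ("other", l5 ++ [p])] := by
              unfold pvStepA
              rw [if_neg h1]
              rw [if_neg h2]
              rw [if_neg h3]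
              rw [if_neg h4]
              simp [PySem.Dict.modify, PySem.Dict.get?, PySem.Dict.getD, PySem.Dict.insert, PySem.Dict.contains]
            rw [hstep, ih]
            simp [List.filter_cons, hc]


-- ===== VERDICT (by name: the statement is the Claim_ definition above) =====
theorem categorize_patterns_py_spec : Claim_equal_categorize_patterns_py := by
  intro patterns _
  unfold Spec_categorize_patterns_py categorize_patterns_py categorize_patterns_py_alt
  rw [show PySem.Dict.ofList [("behavioral", ([] : List String)), ("temporal", []), ("contextual", []), ("environmental", []), ("other", [])] =
        PySem.Dict.mk [("behavioral", []), ("temporal", []), ("contextual", []), ("environmental", []), ("other", [])] from rfl]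
  rw [pv_fold_items]
  simp [pvRules]
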